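-- pv_equiv track=rewrite | github.com/Clamepending/semantic-autogaze | semantic_autogaze/analyze_av_vs_household.py | ensemble_decomp
-- ===== SOURCE A (Python) =====
-- def ensemble_decomp(per_q, configs):
--     """Given per_q {cfg:{qid:0/1}}, return (n_total, ensemble_correct, universal_fail, universal_success, variable)."""
--     # qids present in all configs
--     qids = None
--     for c in configs:
--         if c not in per_q:
--             continue
--         qset = set(per_q[c].keys())
--         qids = qset if qids is None else qids & qset
--     qids = sorted(qids or [])
--     ens_correct = 0
--     u_fail = 0
--     u_succ = 0
--     variable = 0
--     for q in qids:
--         row = [per_q[c][q] for c in configs if c in per_q]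
--         if any(row):
--             ens_correct += 1
--         s = sum(row)
--         if s == 0:
--             u_fail += 1
--         elif s == len(row):
--             u_succ += 1
--         else:
--             variable += 1
--     return len(qids), ens_correct, u_fail, u_succ, variable
-- ===== SOURCE B (Python) =====
-- def ensemble_decomp(per_q, configs):
--     """Given per_q {cfg:{qid:0/1}}, return (n_total, ensemble_correct, universal_fail, universal_success, variable)."""
--     # One pass over the present config occurrences, accumulating per-qid
--     # (occurrence count, score sum, nonzero count); classify afterwards.
--     total = 0
--     acc = {}
--     for c in configs:
--         m = per_q.get(c)
--         if m is None:
--             continue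
--         total += 1
--         for q in m:
--             v = m[q]
--             cnt, sc, nz = acc.get(q, (0, 0, 0))
--             acc[q] = (cnt + 1, sc + v, nz + (1 if v != 0 else 0))
--     n_total = ens = u_fail = u_succ = var = 0
--     for cnt, sc, nz in acc.values():
--         if cnt != total:
--             continue
--         n_total += 1
--         if nz > 0:
--             ens += 1
--         if sc == 0:
--             u_fail += 1
--         elif sc == cnt:
--             u_succ += 1
--         else:
--             var += 1
--     return n_total, ens, u_fail, u_succ, var
-- ===== Notes on version B (the rewrite author's own statement) =====
-- stated objective: alternative
-- what changed: Replaces A's key-set intersection + sort + per-qid row rebuilding (a scan over configs for every qid) by a single pass over the present configs that accumulates per-qid (count, score, nonzero) triples in one dict and classifies each triple afterwards (qid is in every config iff count == total).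
import Mathlib
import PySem

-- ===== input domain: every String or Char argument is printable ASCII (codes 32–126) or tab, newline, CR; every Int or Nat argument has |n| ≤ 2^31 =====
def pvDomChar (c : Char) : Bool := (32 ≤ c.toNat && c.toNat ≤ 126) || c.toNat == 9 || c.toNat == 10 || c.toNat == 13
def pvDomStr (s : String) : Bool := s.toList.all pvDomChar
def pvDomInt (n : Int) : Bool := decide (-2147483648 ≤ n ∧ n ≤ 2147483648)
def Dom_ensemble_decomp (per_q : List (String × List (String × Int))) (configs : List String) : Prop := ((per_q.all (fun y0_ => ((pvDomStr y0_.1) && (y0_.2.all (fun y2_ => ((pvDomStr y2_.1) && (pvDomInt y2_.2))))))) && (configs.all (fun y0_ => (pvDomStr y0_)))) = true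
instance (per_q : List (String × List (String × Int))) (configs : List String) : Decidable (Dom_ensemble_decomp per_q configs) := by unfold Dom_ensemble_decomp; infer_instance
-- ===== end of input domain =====

-- B replaces A's set-intersection + sort + per-qid row rebuilding by one pass that accumulates
-- per-qid (count, score, nonzero) triples in a dict and classifies them afterwards (alternative decomposition).

-- ===== PORT A =====
-- set-intersection step: 'qids = qset if qids is None else qids & qset' (skipping c not in per_q)
def pvA_interStep (pq : PySem.Dict String (List (String × Int)))
    (qids : Option (PySem.Set String)) (c : String) : Option (PySem.Set String) :=
  match pq.get? c with
  | none => qids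
  | some m =>
    let qset : PySem.Set String := PySem.Set.ofList (m.map Prod.fst)
    some (match qids with | none => qset | some s => PySem.Set.inter s qset)

-- 'row = [per_q[c][q] for c in configs if c in per_q]'; q is always a key of per_q[c] when this
-- is reached (q comes from the intersection of all key sets), so the getD default is never used.
def pvA_row (pq : PySem.Dict String (List (String × Int))) (configs : List String) (q : String) : List Int :=
  configs.filterMap (fun c => (pq.get? c).map (fun m => (PySem.Dict.mk m).getD q 0))

-- body of 'for q in qids:' over the accumulator (ens_correct, u_fail, u_succ, variable)
def pvA_qStep (pq : PySem.Dict String (List (String × Int))) (configs : List String)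
    (st : Int × Int × Int × Int) (q : String) : Int × Int × Int × Int :=
  let row := pvA_row pq configs q
  let st1 := if row.any (fun v => v != 0) then (st.1 + 1, st.2.1, st.2.2.1, st.2.2.2) else st
  let s := row.sum
  if s = 0 then (st1.1, st1.2.1 + 1, st1.2.2.1, st1.2.2.2)
  else if s = PySem.List.len row then (st1.1, st1.2.1, st1.2.2.1 + 1, st1.2.2.2)
  else (st1.1, st1.2.1, st1.2.2.1, st1.2.2.2 + 1)

def ensemble_decomp (per_q : List (String × List (String × Int))) (configs : List String) : Int × Int × Int × Int × Int :=
  let pq := PySem.Dict.mk per_q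
  let qidsOpt : Option (PySem.Set String) := configs.foldl (pvA_interStep pq) none
  -- 'qids = sorted(qids or [])' (an empty or missing set both sort to [])
  let qids : List String :=
    PySem.List.sorted (match qidsOpt with | none => ([] : List String) | some s => s) (fun x => x) false
  let r := qids.foldl (pvA_qStep pq configs) (0, 0, 0, 0)
  (PySem.List.len qids, r.1, r.2.1, r.2.2.1, r.2.2.2)

-- ===== PORT B =====
-- body of 'for q in m:' — dict key iteration = first occurrences of the key list
def pvB_upd (md : PySem.Dict String Int) (a : PySem.Dict String (Int × Int × Int)) (q : String) :
    PySem.Dict String (Int × Int × Int) :=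
  let v := md.getD q 0
  let t := a.getD q (0, 0, 0)
  a.insert q (t.1 + 1, t.2.1 + v, t.2.2 + (if v ≠ 0 then 1 else 0))

-- body of 'for c in configs:' carrying (total, acc)
def pvB_cfgStep (pq : PySem.Dict String (List (String × Int)))
    (st : Int × PySem.Dict String (Int × Int × Int)) (c : String) :
    Int × PySem.Dict String (Int × Int × Int) :=
  match pq.get? c with
  | none => st
  | some m =>
    let md := PySem.Dict.mk m
    let acc := (PySem.List.dedup (m.map Prod.fst)).foldl (pvB_upd md) st.2
    (st.1 + 1, acc)

-- body of 'for cnt, sc, nz in acc.values():' over (n_total, ens, u_fail, u_succ, var)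
def pvB_valStep (total : Int) (r : Int × Int × Int × Int × Int) (t : Int × Int × Int) :
    Int × Int × Int × Int × Int :=
  if t.1 ≠ total then r
  else
    let n := r.1 + 1
    let e := r.2.1 + (if 0 < t.2.2 then 1 else 0)
    if t.2.1 = 0 then (n, e, r.2.2.1 + 1, r.2.2.2.1, r.2.2.2.2)
    else if t.2.1 = t.1 then (n, e, r.2.2.1, r.2.2.2.1 + 1, r.2.2.2.2)
    else (n, e, r.2.2.1, r.2.2.2.1, r.2.2.2.2 + 1)

def ensemble_decomp_alt (per_q : List (String × List (String × Int))) (configs : List String) : Int × Int × Int × Int × Int :=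
  let pq := PySem.Dict.mk per_q
  let st := configs.foldl (pvB_cfgStep pq) (0, PySem.Dict.empty)
  st.2.values.foldl (pvB_valStep st.1) (0, 0, 0, 0, 0)

-- ===== PRECONDITION & SPEC =====
def Spec_ensemble_decomp (per_q : List (String × List (String × Int))) (configs : List String) (out : Int × Int × Int × Int × Int) : Prop := out = ensemble_decomp_alt per_q configs
instance (per_q : List (String × List (String × Int))) (configs : List String) (out : Int × Int × Int × Int × Int) : Decidable (Spec_ensemble_decomp per_q configs out) := by unfold Spec_ensemble_decomp; infer_instance

-- ===== CLAIM (what is proved, stated in full; the proofs are below) =====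
def Claim_equal_ensemble_decomp : Prop := ∀ (per_q : List (String × List (String × Int))) (configs : List String), Dom_ensemble_decomp per_q configs → Spec_ensemble_decomp per_q configs (ensemble_decomp per_q configs)

-- ===== LEMMAS AND PROOFS =====

-- the maps of the present configs, in order with multiplicity
def pvMs (pq : PySem.Dict String (List (String × Int))) (configs : List String) : List (List (String × Int)) :=
  configs.filterMap (fun c => pq.get? c)

-- per-qid statistics over a list of maps
def pvCnt (ms : List (List (String × Int))) (q : String) : Int :=
  (ms.countP (fun m => (PySem.Dict.mk m).contains q) : Nat)
def pvSc (ms : List (List (String × Int))) (q : String) : Int :=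
  (ms.map (fun m => if (PySem.Dict.mk m).contains q = true then (PySem.Dict.mk m).getD q 0 else 0)).sum
def pvNz (ms : List (List (String × Int))) (q : String) : Int :=
  (ms.countP (fun m => (PySem.Dict.mk m).contains q && (PySem.Dict.mk m).getD q 0 != 0) : Nat)

-- a fold that skips configs absent from pq is a fold over pvMs
theorem pv_foldl_skip {β : Type} (pq : PySem.Dict String (List (String × Int)))
    (g : β → String → β) (f : β → List (String × Int) → β)
    (h : ∀ st c, g st c = match pq.get? c with | none => st | some m => f st m) :
    ∀ (cs : List String) (b : β), cs.foldl g b = (pvMs pq cs).foldl f b := by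
  intro cs
  induction cs with
  | nil => intro b; simp [pvMs]
  | cons c cs ih =>
    intro b
    simp only [List.foldl_cons, h, pvMs, List.filterMap_cons]
    cases hc : pq.get? c with
    | none => simpa [pvMs] using ih b
    | some m => simpa [pvMs] using ih (f b m)


-- fold bodies with the absent-config skip removed
def pvA_f (qids : Option (PySem.Set String)) (m : List (String × Int)) : Option (PySem.Set String) :=
  some (match qids with
        | none => PySem.Set.ofList (m.map Prod.fst)
        | some s => PySem.Set.inter s (PySem.Set.ofList (m.map Prod.fst)))

-- ---- B-side accumulator characterization ----

def pvB_accStep (a : PySem.Dict String (Int × Int × Int)) (m : List (String × Int)) :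
    PySem.Dict String (Int × Int × Int) :=
  (PySem.List.dedup (m.map Prod.fst)).foldl (pvB_upd (PySem.Dict.mk m)) a

theorem pvB_inner_getD (md : PySem.Dict String Int) :
    ∀ (ks : List String) (a : PySem.Dict String (Int × Int × Int)) (q : String), ks.Nodup →
      (ks.foldl (pvB_upd md) a).getD q (0, 0, 0) =
        if q ∈ ks then
          (let t := a.getD q (0, 0, 0)
           (t.1 + 1, t.2.1 + md.getD q 0, t.2.2 + (if md.getD q 0 ≠ 0 then 1 else 0)))
        else a.getD q (0, 0, 0) := by
  intro ks
  induction ks with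
  | nil => intro a q _; simp
  | cons k ks ih =>
    intro a q hnd
    rw [List.nodup_cons] at hnd
    rw [List.foldl_cons, ih _ q hnd.2]
    by_cases hk : k = q
    · subst hk
      simp [hnd.1, pvB_upd, PySem.Dict.getD_insert_self]
    · have hne : q ≠ k := fun h => hk h.symm
      have e1 : (pvB_upd md a k).getD q (0, 0, 0) = a.getD q (0, 0, 0) := by
        simp [pvB_upd, PySem.Dict.getD_insert, hne]
      simp only [List.mem_cons, e1]
      simp [hne]


theorem pvB_inner_mem_keys (md : PySem.Dict String Int) :
    ∀ (ks : List String) (a : PySem.Dict String (Int × Int × Int)) (q : String),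
      q ∈ (ks.foldl (pvB_upd md) a).keys ↔ q ∈ a.keys ∨ q ∈ ks := by
  intro ks
  induction ks with
  | nil => intro a q; simp
  | cons k ks ih =>
    intro a q
    rw [List.foldl_cons, ih]
    simp [pvB_upd, PySem.Dict.mem_keys_insert, List.mem_cons]
    tauto


theorem pvB_inner_nodup (md : PySem.Dict String Int) :
    ∀ (ks : List String) (a : PySem.Dict String (Int × Int × Int)),
      a.keys.Nodup → (ks.foldl (pvB_upd md) a).keys.Nodup := by
  intro ks a h
  have e : pvB_upd md = fun (a : PySem.Dict String (Int × Int × Int)) q =>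
      a.insert q ((a.getD q (0, 0, 0)).1 + 1, (a.getD q (0, 0, 0)).2.1 + md.getD q 0,
        (a.getD q (0, 0, 0)).2.2 + (if md.getD q 0 ≠ 0 then 1 else 0)) := rfl
  rw [e]
  exact PySem.Dict.nodup_keys_foldl_insert ks _ a h


theorem pvB_acc_getD :
    ∀ (ms : List (List (String × Int))) (a : PySem.Dict String (Int × Int × Int)) (q : String),
      (ms.foldl pvB_accStep a).getD q (0, 0, 0) =
        (let t := a.getD q (0, 0, 0)
         (t.1 + pvCnt ms q, t.2.1 + pvSc ms q, t.2.2 + pvNz ms q)) := by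
  intro ms
  induction ms with
  | nil => intro a q; simp [pvCnt, pvSc, pvNz]
  | cons m ms ih =>
    intro a q
    rw [List.foldl_cons, ih]
    have hc : (PySem.Dict.mk m).contains q = true ↔ q ∈ m.map Prod.fst := by
      rw [PySem.Dict.contains_iff_mem_keys]; simp [PySem.Dict.keys_mk]
    have e1 : (pvB_accStep a m).getD q (0, 0, 0) =
        if (PySem.Dict.mk m).contains q = true then
          (let t := a.getD q (0, 0, 0)
           (t.1 + 1, t.2.1 + (PySem.Dict.mk m).getD q 0,
            t.2.2 + (if (PySem.Dict.mk m).getD q 0 ≠ 0 then 1 else 0)))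
        else a.getD q (0, 0, 0) := by
      rw [pvB_accStep, pvB_inner_getD (PySem.Dict.mk m) _ a q (PySem.List.nodup_dedup _)]
      exact if_congr (by rw [PySem.List.mem_dedup]; exact hc.symm) rfl rfl
    rw [e1]
    simp only [pvCnt, pvSc, pvNz, List.countP_cons, List.map_cons, List.sum_cons]
    by_cases h : (PySem.Dict.mk m).contains q = true
    · simp only [h, if_true, if_pos]
      simp [Prod.ext_iff, h]
      constructor
      · push_cast; omega
      constructor
      · ring
      · by_cases hv : (PySem.Dict.mk m).getD q 0 = 0 <;> simp [hv] <;> push_cast <;> omega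
    · simp only [h]
      simp [Prod.ext_iff, h]


theorem pvB_acc_mem_keys :
    ∀ (ms : List (List (String × Int))) (a : PySem.Dict String (Int × Int × Int)) (q : String),
      q ∈ (ms.foldl pvB_accStep a).keys ↔
        q ∈ a.keys ∨ ∃ m ∈ ms, (PySem.Dict.mk m).contains q = true := by
  intro ms
  induction ms with
  | nil => intro a q; simp
  | cons m ms ih =>
    intro a q
    rw [List.foldl_cons, ih]
    rw [pvB_accStep, pvB_inner_mem_keys]
    have hc : (PySem.Dict.mk m).contains q = true ↔ q ∈ m.map Prod.fst := by
      rw [PySem.Dict.contains_iff_mem_keys]; simp [PySem.Dict.keys_mk]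
    simp only [List.mem_cons, PySem.List.mem_dedup]
    rw [← hc]
    aesop

theorem pvB_acc_nodup :
    ∀ (ms : List (List (String × Int))) (a : PySem.Dict String (Int × Int × Int)),
      a.keys.Nodup → (ms.foldl pvB_accStep a).keys.Nodup := by
  intro ms
  induction ms with
  | nil => intro a h; exact h
  | cons m ms ih =>
    intro a h
    rw [List.foldl_cons]
    exact ih _ (pvB_inner_nodup _ _ _ h)


def pvB_f (st : Int × PySem.Dict String (Int × Int × Int)) (m : List (String × Int)) :
    Int × PySem.Dict String (Int × Int × Int) :=
  (st.1 + 1, pvB_accStep st.2 m)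


-- the final value loop tallies five counts
theorem pvB_valfold (total : Int) :
    ∀ (ts : List (Int × Int × Int)) (r : Int × Int × Int × Int × Int),
      ts.foldl (pvB_valStep total) r =
        (r.1 + ts.countP (fun t => decide (t.1 = total)),
         r.2.1 + ts.countP (fun t => decide (t.1 = total) && decide (0 < t.2.2)),
         r.2.2.1 + ts.countP (fun t => decide (t.1 = total) && decide (t.2.1 = 0)),
         r.2.2.2.1 + ts.countP (fun t => decide (t.1 = total) && !decide (t.2.1 = 0) && decide (t.2.1 = t.1)),
         r.2.2.2.2 + ts.countP (fun t => decide (t.1 = total) && !decide (t.2.1 = 0) && !decide (t.2.1 = t.1))) := by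
  intro ts
  induction ts with
  | nil => intro r; simp
  | cons t ts ih =>
    intro r
    rw [List.foldl_cons, ih]
    simp only [List.countP_cons]
    by_cases h1 : t.1 = total
    · by_cases h2 : t.2.1 = 0
      · by_cases h3 : (0 : Int) < t.2.2 <;>
          · simp [pvB_valStep, h1, h2, h3, Prod.ext_iff]
            push_cast
            omega
      · by_cases h4 : t.2.1 = total
        · have h2' : ¬ (total = 0) := fun h => h2 (h4.trans h)
          by_cases h3 : (0 : Int) < t.2.2 <;>
            · simp [pvB_valStep, h1, h2', h3, h4, Prod.ext_iff]
              push_cast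
              omega
        · by_cases h3 : (0 : Int) < t.2.2 <;>
            · simp [pvB_valStep, h1, h2, h3, h4, Prod.ext_iff]
              push_cast
              omega
    · simp [pvB_valStep, h1, Prod.ext_iff]

-- ---- A-side characterizations ----

-- once the accumulator is 'some s', the intersection fold stays 'some'
def pvA_interStep' (s : PySem.Set String) (m : List (String × Int)) : PySem.Set String :=
  PySem.Set.inter s (PySem.Set.ofList (m.map Prod.fst))

theorem pvA_interfold_some :
    ∀ (ms : List (List (String × Int))) (s : PySem.Set String),
      ms.foldl pvA_f (some s) = some (ms.foldl pvA_interStep' s) := by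
  intro ms
  induction ms with
  | nil => intro s; simp
  | cons m ms ih => intro s; simp [pvA_f, ih, pvA_interStep']

theorem pvA_interfold_mem :
    ∀ (ms : List (List (String × Int))) (s : PySem.Set String) (q : String),
      q ∈ ms.foldl pvA_interStep' s ↔ q ∈ s ∧ ∀ m ∈ ms, (PySem.Dict.mk m).contains q = true := by
  intro ms
  induction ms with
  | nil => intro s q; simp
  | cons m ms ih =>
    intro s q
    rw [List.foldl_cons, ih]
    have hc : (PySem.Dict.mk m).contains q = true ↔ q ∈ m.map Prod.fst := by
      rw [PySem.Dict.contains_iff_mem_keys]; simp [PySem.Dict.keys_mk]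
    simp only [pvA_interStep', PySem.Set.mem_inter, PySem.Set.mem_ofList, List.mem_cons]
    rw [← hc]
    aesop

theorem pvA_interfold_nodup :
    ∀ (ms : List (List (String × Int))) (s : PySem.Set String),
      s.Nodup → (ms.foldl pvA_interStep' s).Nodup := by
  intro ms
  induction ms with
  | nil => intro s h; exact h
  | cons m ms ih =>
    intro s h
    rw [List.foldl_cons]
    exact ih _ (PySem.Set.nodup_inter s _ h)


-- the qid loop tallies four counts
theorem pvA_qfold (pq : PySem.Dict String (List (String × Int))) (configs : List String) :
    ∀ (qs : List String) (st : Int × Int × Int × Int),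
      qs.foldl (pvA_qStep pq configs) st =
        (st.1 + qs.countP (fun q => (pvA_row pq configs q).any (fun v => v != 0)),
         st.2.1 + qs.countP (fun q => decide ((pvA_row pq configs q).sum = 0)),
         st.2.2.1 + qs.countP (fun q => !decide ((pvA_row pq configs q).sum = 0) &&
            decide ((pvA_row pq configs q).sum = PySem.List.len (pvA_row pq configs q))),
         st.2.2.2 + qs.countP (fun q => !decide ((pvA_row pq configs q).sum = 0) &&
            !decide ((pvA_row pq configs q).sum = PySem.List.len (pvA_row pq configs q)))) := by
  intro qs
  induction qs with
  | nil => intro st; simp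
  | cons q qs ih =>
    intro st
    rw [List.foldl_cons, ih]
    simp only [List.countP_cons]
    by_cases ha : (pvA_row pq configs q).any (fun v => v != 0) = true
    · by_cases h0 : (pvA_row pq configs q).sum = 0
      · simp [pvA_qStep, PySem.List.len_eq, ha, h0, Prod.ext_iff]
        push_cast
        omega
      · by_cases hl : (pvA_row pq configs q).sum = ((pvA_row pq configs q).length : Int)
        · have h0' : pvA_row pq configs q ≠ [] := by
            intro he
            exact h0 (by simp [he])
          simp [pvA_qStep, PySem.List.len_eq, ha, h0, h0', hl, Prod.ext_iff]
          push_cast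
          omega
        · simp [pvA_qStep, PySem.List.len_eq, ha, h0, hl, Prod.ext_iff]
          push_cast
          omega
    · have hz : (pvA_row pq configs q).sum = 0 := by
        apply List.sum_eq_zero
        intro v hv
        have hv0 := List.any_eq_false.mp (Bool.not_eq_true _ ▸ ha) v hv
        simpa using hv0
      simp [pvA_qStep, PySem.List.len_eq, ha, hz, Prod.ext_iff]
      push_cast
      omega

theorem pvA_interStep_eq (pq : PySem.Dict String (List (String × Int))) :
    ∀ st c, pvA_interStep pq st c =
      match pq.get? c with | none => st | some m => pvA_f st m := by
  intro st c
  cases h : pq.get? c <;> simp [pvA_interStep, pvA_f, h]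

theorem pvB_cfgStep_eq (pq : PySem.Dict String (List (String × Int))) :
    ∀ st c, pvB_cfgStep pq st c =
      match pq.get? c with | none => st | some m => pvB_f st m := by
  intro st c
  cases h : pq.get? c <;> simp [pvB_cfgStep, pvB_f, pvB_accStep, h]

theorem pvB_fold_pair :
    ∀ (ms : List (List (String × Int))) (t : Int) (a : PySem.Dict String (Int × Int × Int)),
      ms.foldl pvB_f (t, a) = (t + ms.length, ms.foldl pvB_accStep a) := by
  intro ms
  induction ms with
  | nil => intro t a; simp
  | cons m ms ih => intro t a; simp [pvB_f, ih]; omega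

theorem pv_contains_mk (m : List (String × Int)) (q : String) :
    (PySem.Dict.mk m).contains q = true ↔ q ∈ m.map Prod.fst := by
  rw [PySem.Dict.contains_iff_mem_keys]; simp [PySem.Dict.keys_mk]

theorem pvRow_eq (pq : PySem.Dict String (List (String × Int))) (configs : List String) (q : String) :
    pvA_row pq configs q = (pvMs pq configs).map (fun m => (PySem.Dict.mk m).getD q 0) := by
  rw [pvA_row, pvMs, List.map_filterMap]

-- ===== VERDICT (by name: the statement is the Claim_ definition above) =====
theorem ensemble_decomp_spec : Claim_equal_ensemble_decomp := by
  intro per_q configs _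
  show ensemble_decomp per_q configs = ensemble_decomp_alt per_q configs
  simp only [ensemble_decomp, ensemble_decomp_alt]
  rw [pv_foldl_skip (PySem.Dict.mk per_q) _ pvA_f (pvA_interStep_eq _) configs none]
  rw [pv_foldl_skip (PySem.Dict.mk per_q) _ pvB_f (pvB_cfgStep_eq _) configs (0, PySem.Dict.empty)]
  rw [pvB_fold_pair]
  simp only [pvA_qfold, pvB_valfold, pvRow_eq, zero_add]
  generalize pvMs (PySem.Dict.mk per_q) configs = ms
  cases ms with
  | nil => rfl
  | cons m0 rest =>
    have hfold : List.foldl pvA_f none (m0 :: rest) =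
        some (rest.foldl pvA_interStep' (PySem.Set.ofList (m0.map Prod.fst))) := by
      rw [List.foldl_cons]
      exact pvA_interfold_some rest _
    rw [hfold]
    have hSnd : (rest.foldl pvA_interStep' (PySem.Set.ofList (m0.map Prod.fst))).Nodup :=
      pvA_interfold_nodup rest _ (PySem.Set.nodup_ofList _)
    set ms := m0 :: rest with hms
    set S := rest.foldl pvA_interStep' (PySem.Set.ofList (m0.map Prod.fst)) with hS
    set qids := PySem.List.sorted S (fun x => x) false with hq
    set acc := List.foldl pvB_accStep PySem.Dict.empty ms with hacc
    have hKnd : acc.keys.Nodup := pvB_acc_nodup ms _ (by simp)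
    have hqperm : qids.Perm S := PySem.List.sorted_perm S (fun x => x) false
    have hqnd : qids.Nodup := hqperm.nodup_iff.2 hSnd
    have hmemq : ∀ x, x ∈ qids ↔ ∀ m ∈ ms, (PySem.Dict.mk m).contains x = true := by
      intro x
      rw [hq, PySem.List.mem_sorted, hS, pvA_interfold_mem]
      rw [hms, List.forall_mem_cons]
      simp [PySem.Set.mem_ofList, ← pv_contains_mk]
    have hgd : ∀ x, acc.getD x (0, 0, 0) = (pvCnt ms x, pvSc ms x, pvNz ms x) := by
      intro x; rw [hacc, pvB_acc_getD]; simp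
    have hvals : acc.values = acc.keys.map (fun x => (pvCnt ms x, pvSc ms x, pvNz ms x)) := by
      rw [PySem.Dict.values_eq_map_keys acc hKnd (0, 0, 0)]
      exact List.map_congr_left (fun x _ => hgd x)
    have hKmem : ∀ x, x ∈ acc.keys ↔ ∃ m ∈ ms, (PySem.Dict.mk m).contains x = true := by
      intro x; rw [hacc, pvB_acc_mem_keys]; simp
    have hGate : ∀ x, (pvCnt ms x = (ms.length : Int)) ↔
        ∀ m ∈ ms, (PySem.Dict.mk m).contains x = true := by
      intro x
      rw [pvCnt, Nat.cast_inj]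
      exact List.countP_eq_length
    have hperm : qids.Perm (acc.keys.filter (fun x => decide (pvCnt ms x = (ms.length : Int)))) := by
      apply (List.perm_ext_iff_of_nodup hqnd (hKnd.filter _)).2
      intro x
      rw [hmemq, List.mem_filter, hKmem]
      simp only [decide_eq_true_eq, hGate]
      constructor
      · intro h; exact ⟨⟨m0, by simp [hms], h m0 (by simp [hms])⟩, h⟩
      · exact fun h => h.2
    have comp : ∀ (cb pa : String → Bool),
        (∀ x, (∀ m ∈ ms, (PySem.Dict.mk m).contains x = true) → cb x = pa x) →
        List.countP (fun x => cb x && decide (pvCnt ms x = (ms.length : Int))) acc.keys =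
          List.countP pa qids := by
      intro cb pa hcb
      rw [← List.countP_filter]
      rw [← hperm.countP_eq]
      exact List.countP_congr (fun x hx => by rw [hcb x ((hmemq x).1 hx)])
    rw [hvals]
    simp only [List.countP_map, Function.comp_def]
    have hsc : ∀ x, (∀ m ∈ ms, (PySem.Dict.mk m).contains x = true) →
        pvSc ms x = (ms.map (fun m => (PySem.Dict.mk m).getD x 0)).sum := by
      intro x H
      rw [pvSc]
      congr 1
      exact List.map_congr_left (fun m hm => by simp [H m hm])
    have hcnt : ∀ x, (∀ m ∈ ms, (PySem.Dict.mk m).contains x = true) →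
        pvCnt ms x = (ms.length : Int) := fun x H => (hGate x).2 H
    have hlenmap : ∀ x,
        PySem.List.len (ms.map (fun m => (PySem.Dict.mk m).getD x 0)) = (ms.length : Int) := by
      intro x; simp [PySem.List.len_eq]
    have hnz : ∀ x, (∀ m ∈ ms, (PySem.Dict.mk m).contains x = true) →
        (decide (0 < pvNz ms x)) =
          (ms.map (fun m => (PySem.Dict.mk m).getD x 0)).any (fun v => v != 0) := by
      intro x H
      have e : pvNz ms x = ((ms.countP (fun m => (PySem.Dict.mk m).getD x 0 != 0) : Nat) : Int) := by
        rw [pvNz]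
        congr 1
        exact List.countP_congr (fun m hm => by simp [H m hm])
      rw [e, List.any_map]
      rw [Bool.eq_iff_iff]
      simp [List.any_eq_true, List.countP_pos_iff, Function.comp_def]
    simp only [Prod.mk.injEq]
    refine ⟨?_, ?_, ?_, ?_, ?_⟩
    · rw [PySem.List.len_eq, hperm.length_eq, ← List.countP_eq_length_filter]
    · have e1 : List.countP (fun x => decide (pvCnt ms x = (ms.length : Int)) && decide (0 < pvNz ms x)) acc.keys
            = List.countP (fun x => decide (0 < pvNz ms x) && decide (pvCnt ms x = (ms.length : Int))) acc.keys :=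
        List.countP_congr (fun x _ => by rw [Bool.and_comm])
      rw [e1, comp _ _ hnz]
    · have e1 : List.countP (fun x => decide (pvCnt ms x = (ms.length : Int)) && decide (pvSc ms x = 0)) acc.keys
            = List.countP (fun x => decide (pvSc ms x = 0) && decide (pvCnt ms x = (ms.length : Int))) acc.keys :=
        List.countP_congr (fun x _ => by rw [Bool.and_comm])
      rw [e1, comp _ _ (fun x H => by rw [hsc x H])]
    · have e1 : List.countP (fun x => decide (pvCnt ms x = (ms.length : Int)) && !decide (pvSc ms x = 0) && decide (pvSc ms x = pvCnt ms x)) acc.keys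
            = List.countP (fun x => (!decide (pvSc ms x = 0) && decide (pvSc ms x = pvCnt ms x)) && decide (pvCnt ms x = (ms.length : Int))) acc.keys :=
        List.countP_congr (fun x _ => by simp [Bool.and_comm, Bool.and_assoc, Bool.and_left_comm])
      have hcb : ∀ x, (∀ m ∈ ms, (PySem.Dict.mk m).contains x = true) →
          (!decide (pvSc ms x = 0) && decide (pvSc ms x = pvCnt ms x)) =
          (!decide ((List.map (fun m => (PySem.Dict.mk m).getD x 0) ms).sum = 0) &&
            decide ((List.map (fun m => (PySem.Dict.mk m).getD x 0) ms).sum =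
              PySem.List.len (List.map (fun m => (PySem.Dict.mk m).getD x 0) ms))) := by
        intro x H
        rw [hsc x H, hcnt x H, hlenmap x]
      rw [e1, comp _ _ hcb]
    · have e1 : List.countP (fun x => decide (pvCnt ms x = (ms.length : Int)) && !decide (pvSc ms x = 0) && !decide (pvSc ms x = pvCnt ms x)) acc.keys
            = List.countP (fun x => (!decide (pvSc ms x = 0) && !decide (pvSc ms x = pvCnt ms x)) && decide (pvCnt ms x = (ms.length : Int))) acc.keys :=
        List.countP_congr (fun x _ => by simp [Bool.and_comm, Bool.and_assoc, Bool.and_left_comm])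
      have hcb : ∀ x, (∀ m ∈ ms, (PySem.Dict.mk m).contains x = true) →
          (!decide (pvSc ms x = 0) && !decide (pvSc ms x = pvCnt ms x)) =
          (!decide ((List.map (fun m => (PySem.Dict.mk m).getD x 0) ms).sum = 0) &&
            !decide ((List.map (fun m => (PySem.Dict.mk m).getD x 0) ms).sum =
              PySem.List.len (List.map (fun m => (PySem.Dict.mk m).getD x 0) ms))) := by
        intro x H
        rw [hsc x H, hcnt x H, hlenmap x]
      rw [e1, comp _ _ hcb]
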